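-- pv_equiv track=rewrite | github.com/cooi123/FIT3155 | A2/hdbwtpm.py | countingSort
-- ===== SOURCE A (Python) =====
-- def countingSort(input: str, minChar='$', maxChar='~'):
--     """
--     input: bwt string
--     output: sorted bwt string(sa), rank of each character in sa, count of each character in sa
--     O(input)
--     """
--     minCharIndex = ord(minChar)
--     maxCharIndex = ord(maxChar)
--     alphabetSize = maxCharIndex-minCharIndex+1
--     count = alphabetSize*[0]
--     for char in input:
--         count[ord(char)-minCharIndex] += 1
--     rank = [0]*alphabetSize
--     sum = 0
--     for i in range(alphabetSize):
--         sum += count[i]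
--         if count[i] != 0:
--             rank[i] = sum
--
--     sortedInput = len(input)*[None]
--     for char in input:
--         index = ord(char)-minCharIndex
--         rank[index] -= 1
--         sortedInput[rank[index]] = char
--
--     return sortedInput, rank, count
-- ===== SOURCE B (Python) =====
-- def countingSort(input: str, minChar='$', maxChar='~'):
--     minCharIndex = ord(minChar)
--     maxCharIndex = ord(maxChar)
--     alphabetSize = maxCharIndex - minCharIndex + 1
--     count = alphabetSize * [0]
--     for char in input:
--         count[ord(char) - minCharIndex] += 1
--     rank = [0] * alphabetSize
--     sortedInput = []
--     total = 0
--     for i in range(alphabetSize):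
--         if count[i] != 0:
--             rank[i] = total
--             sortedInput.extend(count[i] * chr(i + minCharIndex))
--         total += count[i]
--     return sortedInput, rank, count
-- ===== Notes on version B (the rewrite author's own statement) =====
-- stated objective: alternative
-- what changed: The scatter pass (decrementing rank while placing each input character into a preallocated slot array) is replaced by a single fused walk over the alphabet that emits each present character count[i] times and records its start offset as a running prefix sum; the count histogram pass is kept verbatim.
-- outside the precondition, e.g. on countingSort('a', 'b', 'b'): A returns (['a'], [0], [1]), B returns (['b'], [0], [1])
import Mathlib
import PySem

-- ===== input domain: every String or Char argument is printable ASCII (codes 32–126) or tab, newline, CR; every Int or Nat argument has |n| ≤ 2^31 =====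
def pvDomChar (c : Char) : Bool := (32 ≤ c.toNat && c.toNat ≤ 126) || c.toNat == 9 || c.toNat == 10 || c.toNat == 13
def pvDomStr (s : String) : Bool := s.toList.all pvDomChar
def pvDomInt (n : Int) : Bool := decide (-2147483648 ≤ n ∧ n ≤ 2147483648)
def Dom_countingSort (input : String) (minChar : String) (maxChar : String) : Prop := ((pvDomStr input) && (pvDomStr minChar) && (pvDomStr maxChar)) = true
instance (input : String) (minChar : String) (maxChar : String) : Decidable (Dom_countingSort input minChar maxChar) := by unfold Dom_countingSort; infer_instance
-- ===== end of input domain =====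

-- B replaces A's scatter-placement third pass by a single fused walk over the alphabet emitting each
-- present character count[i] times while recording its start offset as a running prefix sum (objective:
-- alternative decomposition, same cost).

-- ===== PORT A =====

-- ord(s): value of the single character; none = TypeError for a string of length ≠ 1
def pyOrd? (s : String) : Option Int :=
  match s.toList with
  | [c] => some (c.toNat : Int)
  | _ => none

-- "for char in input: count[ord(char) - minCharIndex] += 1"  (shared verbatim by A and B in Python);
-- count[i] += 1 reads then writes index i: none = IndexError exactly where Python raises
def csCountLoop (lo : Int) : List Char → List Int → Option (List Int)
  | [], count => some count
  | c :: rest, count =>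
    match PySem.List.pyGet? count ((c.toNat : Int) - lo) with
    | none => none
    | some v => csCountLoop lo rest (PySem.List.pySetD count ((c.toNat : Int) - lo) (v + 1))

-- A's third pass: "for char in input: index = ...; rank[index] -= 1; sortedInput[rank[index]] = char"
def csScatterLoop (lo : Int) : List Char → List Int → List String → Option (List Int × List String)
  | [], rank, arr => some (rank, arr)
  | c :: rest, rank, arr =>
    match PySem.List.pyGet? rank ((c.toNat : Int) - lo) with
    | none => none
    | some v =>
      let rank' := PySem.List.pySetD rank ((c.toNat : Int) - lo) (v - 1)
      let pos := PySem.List.pyGetD rank' ((c.toNat : Int) - lo) 0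
      match PySem.List.pyGet? arr pos with
      | none => none
      | some _ => csScatterLoop lo rest rank' (PySem.List.pySetD arr pos (String.ofList [c]))

-- "sum = 0; for i in range(alphabetSize): sum += count[i];  if count[i] != 0: rank[i] = sum"
def csRankPass (count : List Int) (size : Int) : Int × List Int :=
  (PySem.List.pyRange 0 size 1).foldl
    (fun (st : Int × List Int) i =>
      let ci := PySem.List.pyGetD count i 0
      (st.1 + ci, if ci ≠ 0 then PySem.List.pySetD st.2 i (st.1 + ci) else st.2))
    (0, List.replicate size.toNat 0)

def countingSort (input : String) (minChar : String) (maxChar : String) : List String × List Int × List Int :=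
  match pyOrd? minChar, pyOrd? maxChar with
  | some minCharIndex, some maxCharIndex =>
    let alphabetSize := maxCharIndex - minCharIndex + 1
    match csCountLoop minCharIndex input.toList (List.replicate alphabetSize.toNat 0) with
    | none => ([], [], [])
    | some count =>
      let rs := csRankPass count alphabetSize
      -- len(input)*[None]: the None placeholder is modelled as "" — on Pre_ inputs every slot is overwritten
      match csScatterLoop minCharIndex input.toList rs.2 (List.replicate input.toList.length "") with
      | none => ([], [], [])
      | some ra => (ra.2, ra.1, count)
  | _, _ => ([], [], [])

-- ===== PORT B =====

-- "total = 0; for i in range(alphabetSize): if count[i] != 0: rank[i] = total;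
--    sortedInput.extend(count[i] * chr(i + minCharIndex));  total += count[i]"
def csBuildPass (count : List Int) (size : Int) (minCharIndex : Int) : List Int × List String × Int :=
  (PySem.List.pyRange 0 size 1).foldl
    (fun (st : List Int × List String × Int) i =>
      let ci := PySem.List.pyGetD count i 0
      if ci ≠ 0 then
        (PySem.List.pySetD st.1 i st.2.2,
         st.2.1 ++ List.replicate ci.toNat (String.ofList [Char.ofNat (i + minCharIndex).toNat]),
         st.2.2 + ci)
      else (st.1, st.2.1, st.2.2 + ci))
    (List.replicate size.toNat 0, ([], 0))

def countingSort_alt (input : String) (minChar : String) (maxChar : String) : List String × List Int × List Int :=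
  match pyOrd? minChar with
  | none => ([], [], [])
  | some minCharIndex =>
    match pyOrd? maxChar with
    | none => ([], [], [])
    | some maxCharIndex =>
      let alphabetSize := maxCharIndex - minCharIndex + 1
      -- first pass: verbatim the same histogram loop as A (same line of Python in Source B)
      match csCountLoop minCharIndex input.toList (List.replicate alphabetSize.toNat 0) with
      | some count =>
        let st := csBuildPass count alphabetSize minCharIndex
        (st.2.1, st.1, count)
      | none => ([], [], [])

-- ===== PRECONDITION & SPEC =====

-- Pre_ excludes inputs on which A raises (TypeError for a minChar/maxChar of length ≠ 1; IndexError for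
-- characters above maxChar or more than alphabetSize below minChar) and inputs with characters slightly
-- below minChar, where Python's negative-index wraparound makes A place the character at an accidental
-- position while B emits an accidental alias character — neither value is specified behaviour of the sort.
def Pre_countingSort (input : String) (minChar : String) (maxChar : String) : Prop :=
  minChar.toList.length = 1 ∧ maxChar.toList.length = 1 ∧
  input.toList.all
    (fun c => decide (minChar.toList.headD ' ' ≤ c) && decide (c ≤ maxChar.toList.headD ' ')) = true
instance (input : String) (minChar : String) (maxChar : String) : Decidable (Pre_countingSort input minChar maxChar) := by unfold Pre_countingSort; infer_instance

def pvWitness_countingSort : String × String × String := ("banana", "a", "z")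

def Spec_countingSort (input : String) (minChar : String) (maxChar : String) (out : List String × List Int × List Int) : Prop := out = countingSort_alt input minChar maxChar
instance (input : String) (minChar : String) (maxChar : String) (out : List String × List Int × List Int) : Decidable (Spec_countingSort input minChar maxChar out) := by unfold Spec_countingSort; infer_instance

-- ===== CLAIM (what is proved, stated in full; the proofs are below) =====
def Claim_equal_countingSort : Prop := ∀ (input : String) (minChar : String) (maxChar : String), Dom_countingSort input minChar maxChar → Pre_countingSort input minChar maxChar → Spec_countingSort input minChar maxChar (countingSort input minChar maxChar)

-- ===== LEMMAS AND PROOFS =====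

-- number of occurrences (as an Int) in L of the character with code m + j
def occC (m : Nat) (L : List Char) (j : Nat) : Int := (L.countP (fun c => c.toNat == m + j) : Int)

-- sum of the first j counts
def preS (count : List Int) (j : Nat) : Int := (count.take j).sum

-- B's concatenated output over the first k buckets
def segcat (m : Nat) (count : List Int) (k : Nat) : List String :=
  (List.range k).flatMap (fun i => List.replicate (count.getD i 0).toNat (String.ofList [Char.ofNat (m + i)]))

lemma getD_set_self {α : Type} (l : List α) (k : Nat) (v d : α) (h : k < l.length) :
    (l.set k v).getD k d = v := by
  simp [List.getD_eq_getElem?_getD, h]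

lemma getD_set_ne {α : Type} (l : List α) (k j : Nat) (v d : α) (h : j ≠ k) :
    (l.set k v).getD j d = l.getD j d := by
  simp [List.getD_eq_getElem?_getD, Ne.symm h]

lemma sum_set_int (l : List Int) (k : Nat) (v : Int) (h : k < l.length) :
    (l.set k v).sum = l.sum - l[k] + v := by
  induction l generalizing k with
  | nil => simp at h
  | cons x xs ih =>
    cases k with
    | zero => simp [List.set]; ring
    | succ k => simp [List.set, ih k (by simpa using h)]; ring

lemma preS_succ (count : List Int) (j : Nat) (h : j < count.length) :
    preS count (j + 1) = preS count j + count.getD j 0 := by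
  simp [preS, List.sum_take_succ count j h, List.getD_eq_getElem?_getD, h]

-- the histogram loop succeeds and computes occurrence counts
lemma preS_mono (count : List Int) (hpos : ∀ j < count.length, 0 ≤ count.getD j 0)
    (a b : Nat) (hab : a ≤ b) (hb : b ≤ count.length) : preS count a ≤ preS count b := by
  induction b with
  | zero =>
    have : a = 0 := by omega
    simp [this]
  | succ b ih =>
    rcases Nat.lt_or_ge a (b+1) with h | h
    · have h1 : a ≤ b := by omega
      have := ih (by omega) (by omega)
      have h2 := preS_succ count b (by omega)
      have h3 := hpos b (by omega)
      omega
    · have : a = b + 1 := by omega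
      simp [this]

lemma preS_nonneg (count : List Int) (hpos : ∀ j < count.length, 0 ≤ count.getD j 0)
    (a : Nat) (ha : a ≤ count.length) : 0 ≤ preS count a := by
  have := preS_mono count hpos 0 a (by omega) ha
  simpa [preS] using this

lemma segcat_succ (m : Nat) (count : List Int) (k : Nat) :
    segcat m count (k + 1)
      = segcat m count k
        ++ List.replicate (count.getD k 0).toNat (String.ofList [Char.ofNat (m + k)]) := by
  simp [segcat, List.range_succ]

lemma segcat_length (m : Nat) (count : List Int) (k : Nat) (hk : k ≤ count.length)
    (hpos : ∀ j < count.length, 0 ≤ count.getD j 0) :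
    ((segcat m count k).length : Int) = preS count k := by
  induction k with
  | zero => simp [segcat, preS]
  | succ k ih =>
    have hk' : k < count.length := by omega
    have h0 := hpos k hk'
    have ih' := ih (by omega)
    rw [preS_succ count k hk', segcat_succ, List.length_append, List.length_replicate]
    omega

lemma segcat_getD_aux (m : Nat) (count : List Int)
    (hpos : ∀ j < count.length, 0 ≤ count.getD j 0) (k : Nat) (hk : k ≤ count.length)
    (j : Nat) (hj : j < k) (p : Nat)
    (h1 : preS count j ≤ (p : Int)) (h2 : (p : Int) < preS count (j + 1)) :
    (segcat m count k).getD p "" = String.ofList [Char.ofNat (m + j)] := by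
  induction k with
  | zero => omega
  | succ k ih =>
    rw [segcat_succ]
    have hlenk : ((segcat m count k).length : Int) = preS count k :=
      segcat_length m count k (by omega) hpos
    by_cases hjk : j = k
    · -- p lies in the k-th segment appended at the end
      have hge : (segcat m count k).length ≤ p := by
        rw [hjk] at h1; omega
      rw [List.getD_append_right _ _ "" p hge]
      have hcnt := hpos k (by omega)
      have hlt : p - (segcat m count k).length < (count.getD k 0).toNat := by
        have := preS_succ count k (by omega)
        rw [hjk] at h2
        omega
      rw [List.getD_replicate _ hlt, hjk]
    · have hjk' : j < k := by omega
      have hple : (p : Int) < preS count k := by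
        have := preS_mono count hpos (j + 1) k (by omega) (by omega)
        omega
      have hlt : p < (segcat m count k).length := by omega
      rw [List.getD_append _ _ "" p hlt]
      exact ih (by omega) hjk'

lemma segcat_getD (m : Nat) (count : List Int) (hpos : ∀ j < count.length, 0 ≤ count.getD j 0)
    (j : Nat) (hj : j < count.length) (p : Nat)
    (h1 : preS count j ≤ (p : Int)) (h2 : (p : Int) < preS count (j + 1)) :
    (segcat m count count.length).getD p "" = String.ofList [Char.ofNat (m + j)] := by
  exact segcat_getD_aux m count hpos count.length (le_refl _) j hj p h1 h2

lemma csCountLoop_spec (m : Nat) (L : List Char) (cnt : List Int)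
    (hin : ∀ c ∈ L, m ≤ c.toNat ∧ c.toNat < m + cnt.length) :
    ∃ R, csCountLoop (m : Int) L cnt = some R ∧ R.length = cnt.length ∧
      (∀ j < cnt.length, R.getD j 0 = cnt.getD j 0 + occC m L j) ∧
      R.sum = cnt.sum + L.length := by
  induction L generalizing cnt with
  | nil =>
    exact ⟨cnt, rfl, rfl, fun j hj => by simp [occC], by simp⟩
  | cons c rest ih =>
    obtain ⟨hc1, hc2⟩ := hin c (List.mem_cons_self ..)
    set k := c.toNat - m with hkdef
    have hk : k < cnt.length := by omega
    have hidx : (c.toNat : Int) - (m : Int) = ((k : Nat) : Int) := by omega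
    have hget : PySem.List.pyGet? cnt ((c.toNat : Int) - (m : Int)) = some cnt[k] := by
      rw [hidx, PySem.List.pyGet?_natCast, List.getElem?_eq_getElem hk]
    have hset : PySem.List.pySetD cnt ((c.toNat : Int) - (m : Int)) (cnt[k] + 1)
        = cnt.set k (cnt[k] + 1) := by
      rw [hidx, PySem.List.pySetD_natCast]
    have hin' : ∀ x ∈ rest, m ≤ x.toNat ∧ x.toNat < m + (cnt.set k (cnt[k] + 1)).length := by
      intro x hx
      have := hin x (List.mem_cons_of_mem _ hx)
      simpa using this
    obtain ⟨R, hR1, hR2, hR3, hR4⟩ := ih (cnt.set k (cnt[k] + 1)) hin'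
    refine ⟨R, ?_, ?_, ?_, ?_⟩
    · simp only [csCountLoop, hget, hset]
      exact hR1
    · simpa using hR2
    · intro j hj
      have hj' : j < (cnt.set k (cnt[k] + 1)).length := by simpa using hj
      have h3 := hR3 j hj'
      have hck : c.toNat = m + k := by omega
      have hocc : occC m (c :: rest) j = occC m rest j + (if j = k then 1 else 0) := by
        simp only [occC, List.countP_cons]
        by_cases hjk : j = k
        · have hcj : c.toNat = m + j := by omega
          simp [hjk, hcj]
        · have ht : (c.toNat == m + j) = false := by simp; omega
          simp [hjk, ht]
      by_cases hjk : j = k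
      · rw [h3, hocc]
        have hcg : cnt.getD k 0 = cnt[k] := by
          rw [List.getD_eq_getElem?_getD, List.getElem?_eq_getElem hk]
          rfl
        rw [hjk, if_pos rfl, getD_set_self cnt k (cnt[k] + 1) 0 hk, hcg]
        ring
      · rw [h3, hocc, getD_set_ne cnt k j _ 0 hjk]
        simp [hjk]
    · rw [hR4, sum_set_int cnt k _ hk]
      simp
      ring

lemma rankA_aux (count : List Int) (k : Nat) (hk : k ≤ count.length) :
    ((List.range k).foldl
        (fun (st : Int × List Int) (i : Nat) =>
          (st.1 + count.getD i 0,
           if count.getD i 0 ≠ 0 then st.2.set i (st.1 + count.getD i 0) else st.2))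
        (0, List.replicate count.length 0)).1 = preS count k ∧
    ((List.range k).foldl
        (fun (st : Int × List Int) (i : Nat) =>
          (st.1 + count.getD i 0,
           if count.getD i 0 ≠ 0 then st.2.set i (st.1 + count.getD i 0) else st.2))
        (0, List.replicate count.length 0)).2.length = count.length ∧
    ∀ j < count.length,
      ((List.range k).foldl
        (fun (st : Int × List Int) (i : Nat) =>
          (st.1 + count.getD i 0,
           if count.getD i 0 ≠ 0 then st.2.set i (st.1 + count.getD i 0) else st.2))
        (0, List.replicate count.length 0)).2.getD j 0
      = if j < k ∧ count.getD j 0 ≠ 0 then preS count (j + 1) else 0 := by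
  induction k with
  | zero =>
    refine ⟨by simp [preS], by simp, fun j hj => by simp [List.getD_eq_getElem?_getD, hj]⟩
  | succ k ih =>
    obtain ⟨ih1, ih2, ih3⟩ := ih (by omega)
    rw [List.range_succ, List.foldl_append] at *
    set F := (List.range k).foldl
        (fun (st : Int × List Int) (i : Nat) =>
          (st.1 + count.getD i 0,
           if count.getD i 0 ≠ 0 then st.2.set i (st.1 + count.getD i 0) else st.2))
        (0, List.replicate count.length 0) with hF
    simp only [List.foldl_cons, List.foldl_nil]
    have hk' : k < count.length := by omega
    have hsum : F.1 + count.getD k 0 = preS count (k + 1) := by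
      rw [ih1, preS_succ count k hk']
    refine ⟨hsum, ?_, ?_⟩
    · by_cases hz : count.getD k 0 ≠ 0
      · rw [if_pos hz, List.length_set, ih2]
      · rw [if_neg hz, ih2]
    · intro j hj
      by_cases hz : count.getD k 0 ≠ 0
      · simp only [if_pos hz]
        by_cases hjk : j = k
        · rw [hjk, getD_set_self F.2 k _ 0 (by omega), hsum, if_pos ⟨by omega, hjk ▸ hz⟩]
        · rw [getD_set_ne F.2 k j _ 0 hjk, ih3 j hj]
          have hcond : (j < k ∧ count.getD j 0 ≠ 0) ↔ (j < k + 1 ∧ count.getD j 0 ≠ 0) := by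
            constructor
            · rintro ⟨h1, h2⟩; exact ⟨by omega, h2⟩
            · rintro ⟨h1, h2⟩; exact ⟨by omega, h2⟩
          exact if_congr hcond rfl rfl
      · simp only [if_neg hz, ih3 j hj]
        simp only [not_not] at hz
        by_cases hjk : j = k
        · have hcond1 : ¬ (j < k ∧ count.getD j 0 ≠ 0) := by
            rw [hjk]; exact fun h => h.2 hz
          have hcond2 : ¬ (j < k + 1 ∧ count.getD j 0 ≠ 0) := by
            rw [hjk]; exact fun h => h.2 hz
          rw [if_neg hcond1, if_neg hcond2]
        · have hcond : (j < k ∧ count.getD j 0 ≠ 0) ↔ (j < k + 1 ∧ count.getD j 0 ≠ 0) := by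
            constructor
            · rintro ⟨h1, h2⟩; exact ⟨by omega, h2⟩
            · rintro ⟨h1, h2⟩; exact ⟨by omega, h2⟩
          exact if_congr hcond rfl rfl

-- A's rank pass: rank[j] = inclusive prefix sum for present buckets, 0 otherwise
lemma rankA_spec (count : List Int) :
    (csRankPass count (count.length : Int)).2.length = count.length ∧
    ∀ j < count.length,
      (csRankPass count (count.length : Int)).2.getD j 0
      = if count.getD j 0 ≠ 0 then preS count (j + 1) else 0 := by
  have conv1 : csRankPass count (count.length : Int)
      = (List.range count.length).foldl
        (fun (st : Int × List Int) (i : Nat) =>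
          (st.1 + count.getD i 0,
           if count.getD i 0 ≠ 0 then st.2.set i (st.1 + count.getD i 0) else st.2))
        (0, List.replicate count.length 0) := by
    unfold csRankPass
    rw [PySem.List.pyRange_zero_natCast, List.foldl_map]
    simp only [PySem.List.pyGetD_natCast, PySem.List.pySetD_natCast, Int.toNat_natCast]
  obtain ⟨h1, h2, h3⟩ := rankA_aux count count.length (le_refl _)
  constructor
  · rw [conv1]; exact h2
  · intro j hj
    rw [conv1, h3 j hj]
    have : (j < count.length ∧ count.getD j 0 ≠ 0) ↔ (count.getD j 0 ≠ 0) := by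
      constructor
      · exact fun h => h.2
      · exact fun h => ⟨hj, h⟩
    exact if_congr this rfl rfl

-- B's fused pass: rank = exclusive prefix sums, output = concatenated segments, total threads the sums
lemma foldB_spec (m : Nat) (count : List Int) :
    csBuildPass count (count.length : Int) (m : Int)
      = (((List.range count.length).foldl
            (fun r j => if count.getD j 0 ≠ 0 then r.set j (preS count j) else r)
            (List.replicate count.length 0)),
         (segcat m count count.length, preS count count.length)) := by
  have conv1 : csBuildPass count (count.length : Int) (m : Int)
      = (List.range count.length).foldl
        (fun (st : List Int × List String × Int) (i : Nat) =>
          if count.getD i 0 ≠ 0 then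
            (st.1.set i st.2.2,
             st.2.1 ++ List.replicate (count.getD i 0).toNat
               (String.ofList [Char.ofNat ((i : Int) + (m : Int)).toNat]),
             st.2.2 + count.getD i 0)
          else (st.1, st.2.1, st.2.2 + count.getD i 0))
        (List.replicate count.length 0, ([], 0)) := by
    unfold csBuildPass
    rw [PySem.List.pyRange_zero_natCast, List.foldl_map]
    simp only [PySem.List.pyGetD_natCast, PySem.List.pySetD_natCast, Int.toNat_natCast]
  rw [conv1]
  have aux : ∀ k ≤ count.length,
      (List.range k).foldl
        (fun (st : List Int × List String × Int) (i : Nat) =>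
          if count.getD i 0 ≠ 0 then
            (st.1.set i st.2.2,
             st.2.1 ++ List.replicate (count.getD i 0).toNat
               (String.ofList [Char.ofNat ((i : Int) + (m : Int)).toNat]),
             st.2.2 + count.getD i 0)
          else (st.1, st.2.1, st.2.2 + count.getD i 0))
        (List.replicate count.length 0, ([], 0))
      = (((List.range k).foldl
            (fun r j => if count.getD j 0 ≠ 0 then r.set j (preS count j) else r)
            (List.replicate count.length 0)),
         (segcat m count k, preS count k)) := by
    intro k hk
    induction k with
    | zero => simp [segcat, preS]
    | succ k ih =>
      rw [List.range_succ, List.foldl_append, List.foldl_append, ih (by omega)]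
      simp only [List.foldl_cons, List.foldl_nil]
      have hk' : k < count.length := by omega
      have hchar : ((k : Int) + (m : Int)).toNat = m + k := by omega
      by_cases hz : count.getD k 0 ≠ 0
      · rw [if_pos hz, if_pos hz]
        rw [Prod.mk.injEq, Prod.mk.injEq]
        refine ⟨rfl, ?_, (preS_succ count k hk').symm⟩
        rw [segcat_succ, hchar]
      · rw [if_neg hz, if_neg hz]
        rw [Prod.mk.injEq, Prod.mk.injEq]
        simp only [not_not] at hz
        refine ⟨rfl, ?_, (preS_succ count k hk').symm⟩
        rw [segcat_succ, hz]
        simp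
  exact aux count.length (le_refl _)

-- the rank list B builds, pointwise
lemma foldl_set_length {α : Type} (is : List Nat) (P : Nat → Bool) (v : Nat → α) (r : List α) :
    (is.foldl (fun r i => if P i then r.set i (v i) else r) r).length = r.length := by
  induction is generalizing r with
  | nil => rfl
  | cons i rest ih =>
    simp only [List.foldl_cons]
    rw [ih]
    by_cases h : P i <;> simp [h]

lemma rankB_length (count : List Int) (k : Nat) :
    (((List.range k).foldl
        (fun r i => if count.getD i 0 ≠ 0 then r.set i (preS count i) else r)
        (List.replicate count.length 0))).length = count.length := by
  have := foldl_set_length (List.range k) (fun i => decide (count.getD i 0 ≠ 0))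
      (fun i => preS count i) (List.replicate count.length 0)
  simpa using this

lemma rankB_getD (count : List Int) (k : Nat) (hk : k ≤ count.length) (j : Nat) (hj : j < count.length) :
    (((List.range k).foldl
        (fun r i => if count.getD i 0 ≠ 0 then r.set i (preS count i) else r)
        (List.replicate count.length 0))).getD j 0
    = if j < k ∧ count.getD j 0 ≠ 0 then preS count j else 0 := by
  induction k with
  | zero => simp [List.getD_eq_getElem?_getD, hj]
  | succ k ih =>
    rw [List.range_succ, List.foldl_append]
    set r0 := (List.range k).foldl
        (fun r i => if count.getD i 0 ≠ 0 then r.set i (preS count i) else r)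
        (List.replicate count.length 0) with hr0
    have hlen : r0.length = count.length := rankB_length count k
    have ih' := ih (by omega)
    simp only [List.foldl_cons, List.foldl_nil]
    by_cases hz : count.getD k 0 ≠ 0
    · rw [if_pos hz]
      by_cases hjk : j = k
      · rw [hjk, getD_set_self r0 k _ 0 (by omega)]
        rw [if_pos ⟨by omega, hjk ▸ hz⟩]
      · rw [getD_set_ne r0 k j _ 0 hjk, ih']
        by_cases hjlt : j < k
        · have h1 : j < k + 1 := by omega
          simp [hjlt, h1]
        · have h1 : ¬ j < k + 1 := by omega
          simp [hjlt, h1]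
    · rw [if_neg hz, ih']
      simp only [not_not] at hz
      by_cases hjk : j = k
      · have hcond1 : ¬ (j < k ∧ count.getD j 0 ≠ 0) := by
          rw [hjk]; exact fun h => h.2 hz
        have hcond2 : ¬ (j < k + 1 ∧ count.getD j 0 ≠ 0) := by
          rw [hjk]; exact fun h => h.2 hz
        rw [if_neg hcond1, if_neg hcond2]
      · have hcond : (j < k ∧ count.getD j 0 ≠ 0) ↔ (j < k + 1 ∧ count.getD j 0 ≠ 0) := by
          constructor
          · rintro ⟨h1, h2⟩; exact ⟨by omega, h2⟩
          · rintro ⟨h1, h2⟩; exact ⟨by omega, h2⟩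
        exact if_congr hcond rfl rfl

-- the scatter loop: success, final ranks, and a pointwise description of the slot array
lemma csScatterLoop_spec (m sz : Nat) (L : List Char) (rank : List Int) (arr : List String)
    (hlen : rank.length = sz)
    (hin : ∀ c ∈ L, m ≤ c.toNat ∧ c.toNat < m + sz)
    (hb : ∀ j < sz, 0 < occC m L j →
        0 ≤ rank.getD j 0 - occC m L j ∧ rank.getD j 0 ≤ (arr.length : Int))
    (hd : ∀ j < sz, ∀ j' < sz, j ≠ j' → 0 < occC m L j → 0 < occC m L j' →
        rank.getD j 0 ≤ rank.getD j' 0 - occC m L j' ∨ rank.getD j' 0 ≤ rank.getD j 0 - occC m L j) :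
    ∃ rankF arrF, csScatterLoop (m : Int) L rank arr = some (rankF, arrF) ∧
      rankF.length = sz ∧ arrF.length = arr.length ∧
      (∀ j < sz, rankF.getD j 0 = rank.getD j 0 - occC m L j) ∧
      (∀ j < sz, ∀ p : Nat, rank.getD j 0 - occC m L j ≤ (p : Int) → (p : Int) < rank.getD j 0 →
        arrF.getD p "" = String.ofList [Char.ofNat (m + j)]) ∧
      (∀ p : Nat, (∀ j < sz, ¬(rank.getD j 0 - occC m L j ≤ (p : Int) ∧ (p : Int) < rank.getD j 0)) →
        arrF.getD p "" = arr.getD p "") := by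
  induction L generalizing rank arr with
  | nil =>
    refine ⟨rank, arr, rfl, hlen, rfl, ?_, ?_, ?_⟩
    · intro j hj; simp [occC]
    · intro j hj p hp1 hp2
      exfalso
      simp only [occC, List.countP_nil, Nat.cast_zero, sub_zero] at hp1
      omega
    · intro p hp; rfl
  | cons c rest ih =>
    obtain ⟨hc1, hc2⟩ := hin c (List.mem_cons_self ..)
    set k := c.toNat - m with hkdef
    have hck : c.toNat = m + k := by omega
    have hk : k < sz := by omega
    have hocc : ∀ j, occC m (c :: rest) j = occC m rest j + (if j = k then 1 else 0) := by
      intro j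
      simp only [occC, List.countP_cons]
      by_cases hjk : j = k
      · have hcj : c.toNat = m + j := by omega
        simp [hjk, hcj]
      · have ht : (c.toNat == m + j) = false := by simp; omega
        simp [hjk, ht]
    have hoccnn : ∀ (L' : List Char) (j : Nat), 0 ≤ occC m L' j := by
      intro L' j; exact Int.natCast_nonneg _
    have hockpos : 0 < occC m (c :: rest) k := by
      have e := hocc k
      rw [if_pos rfl] at e
      have := hoccnn rest k
      omega
    set r := rank.getD k 0 with hrdef
    obtain ⟨hbk1, hbk2⟩ := hb k hk hockpos
    have hr1 : 1 ≤ r := by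
      have e := hocc k
      rw [if_pos rfl] at e
      have := hoccnn rest k
      omega
    -- evaluate one step of the loop
    have hidx : (c.toNat : Int) - (m : Int) = ((k : Nat) : Int) := by omega
    have hget1 : PySem.List.pyGet? rank ((c.toNat : Int) - (m : Int)) = some r := by
      rw [hidx, PySem.List.pyGet?_natCast, List.getElem?_eq_getElem (by omega : k < rank.length)]
      congr 1
      rw [hrdef, List.getD_eq_getElem?_getD, List.getElem?_eq_getElem (by omega : k < rank.length)]
      rfl
    have hset1 : PySem.List.pySetD rank ((c.toNat : Int) - (m : Int)) (r - 1) = rank.set k (r - 1) := by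
      rw [hidx, PySem.List.pySetD_natCast]
    have hpos1 : PySem.List.pyGetD (rank.set k (r - 1)) ((c.toNat : Int) - (m : Int)) 0 = r - 1 := by
      rw [hidx, PySem.List.pyGetD_natCast]
      exact getD_set_self rank k (r - 1) 0 (by omega)
    set p0 : Nat := (r - 1).toNat with hp0def
    have hp0 : (p0 : Int) = r - 1 := by omega
    have hp0lt : p0 < arr.length := by omega
    have hget2 : PySem.List.pyGet? arr (r - 1) = some arr[p0] := by
      rw [PySem.List.pyGet?_of_nonneg arr (by omega : (0:Int) ≤ r - 1), ← hp0def,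
        List.getElem?_eq_getElem hp0lt]
    have hset2 : PySem.List.pySetD arr (r - 1) (String.ofList [c]) = arr.set p0 (String.ofList [c]) := by
      rw [PySem.List.pySetD_of_nonneg arr (String.ofList [c]) (by omega : (0:Int) ≤ r - 1), ← hp0def]
    -- the modified state
    have hrank' : ∀ j, (rank.set k (r - 1)).getD j 0 = if j = k then r - 1 else rank.getD j 0 := by
      intro j
      by_cases hjk : j = k
      · rw [hjk, getD_set_self rank k (r - 1) 0 (by omega), if_pos rfl]
      · rw [getD_set_ne rank k j (r - 1) 0 hjk, if_neg hjk]
    -- apply the induction hypothesis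
    have hlenset : (arr.set p0 (String.ofList [c])).length = arr.length := by
      rw [List.length_set]
    have hrj : ∀ j, j = k → rank.getD j 0 = r := by
      intro j hjk
      rw [hjk, hrdef]
    obtain ⟨rankF, arrF, hL1, hL2, hL3, hL4, hL5, hL6⟩ :=
      ih (rank.set k (r - 1)) (arr.set p0 (String.ofList [c]))
        (by simpa using hlen)
        (fun x hx => hin x (List.mem_cons_of_mem _ hx))
        (by
          intro j hj hjocc
          have e := hocc j
          rw [hrank' j]
          by_cases hjk : j = k
          · rw [if_pos hjk] at e
            have hLocc : 0 < occC m (c :: rest) j := by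
              have := hoccnn rest j
              omega
            obtain ⟨hb1, hb2⟩ := hb j hj hLocc
            have hj' := hrj j hjk
            rw [if_pos hjk]
            constructor <;> omega
          · rw [if_neg hjk] at e
            have hLocc : 0 < occC m (c :: rest) j := by omega
            obtain ⟨hb1, hb2⟩ := hb j hj hLocc
            rw [if_neg hjk]
            constructor <;> omega)
        (by
          intro j hj j' hj' hne hoj hoj'
          rw [hrank' j, hrank' j']
          have e1 := hocc j
          have e2 := hocc j'
          have hn1 := hoccnn rest j
          have hn2 := hoccnn rest j'
          have hLj : 0 < occC m (c :: rest) j := by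
            by_cases hjk : j = k
            · rw [if_pos hjk] at e1; omega
            · rw [if_neg hjk] at e1; omega
          have hLj' : 0 < occC m (c :: rest) j' := by
            by_cases hjk : j' = k
            · rw [if_pos hjk] at e2; omega
            · rw [if_neg hjk] at e2; omega
          have hdis := hd j hj j' hj' hne hLj hLj'
          by_cases hjk : j = k
          · have hjk' : ¬ j' = k := by omega
            rw [if_pos hjk] at e1
            rw [if_neg hjk'] at e2
            rw [if_pos hjk, if_neg hjk']
            have := hrj j hjk
            omega
          · by_cases hjk' : j' = k
            · rw [if_neg hjk] at e1
              rw [if_pos hjk'] at e2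
              rw [if_neg hjk, if_pos hjk']
              have := hrj j' hjk'
              omega
            · rw [if_neg hjk] at e1
              rw [if_neg hjk'] at e2
              rw [if_neg hjk, if_neg hjk']
              omega)
    refine ⟨rankF, arrF, ?_, hL2, by simpa using hL3, ?_, ?_, ?_⟩
    · -- the loop computation
      simp only [csScatterLoop, hget1, hset1, hpos1, hget2, hset2]
      exact hL1
    · intro j hj
      rw [hL4 j hj, hrank' j]
      have e := hocc j
      by_cases hjk : j = k
      · rw [if_pos hjk] at e
        rw [if_pos hjk]
        have := hrj j hjk
        omega
      · rw [if_neg hjk] at e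
        rw [if_neg hjk]
        omega
    · intro j hj p hq1 hq2
      have e := hocc j
      by_cases hjk : j = k
      · rw [if_pos hjk] at e
        have hj' := hrj j hjk
        by_cases hpe : (p : Int) = r - 1
        · have hpp0 : p = p0 := by omega
          have hnone : ∀ j' < sz, ¬((rank.set k (r - 1)).getD j' 0 - occC m rest j' ≤ (p0 : Int) ∧ (p0 : Int) < (rank.set k (r - 1)).getD j' 0) := by
            intro j' hj'sz
            rw [hrank' j']
            by_cases hjk' : j' = k
            · rw [if_pos hjk']
              omega
            · rw [if_neg hjk']
              rintro ⟨hx1, hx2⟩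
              have hn2 := hoccnn rest j'
              have hor : 0 < occC m rest j' := by omega
              have e2 := hocc j'
              rw [if_neg hjk'] at e2
              have hLj' : 0 < occC m (c :: rest) j' := by omega
              have hdis := hd k hk j' hj'sz (fun h => hjk' h.symm) hockpos hLj'
              have e1 := hocc k
              rw [if_pos rfl] at e1
              omega
          rw [hpp0, hL6 p0 hnone, getD_set_self arr p0 _ "" hp0lt]
          rw [hjk, ← hck, Char.ofNat_toNat]
        · -- p lies strictly inside the shrunk interval handled by the IH
          have hq1' : (rank.set k (r - 1)).getD j 0 - occC m rest j ≤ (p : Int) := by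
            rw [hrank' j, if_pos hjk]
            have := hrj j hjk
            omega
          have hq2' : (p : Int) < (rank.set k (r - 1)).getD j 0 := by
            rw [hrank' j, if_pos hjk]
            have := hrj j hjk
            omega
          exact hL5 j hj p hq1' hq2'
      · rw [if_neg hjk] at e
        have hq1' : (rank.set k (r - 1)).getD j 0 - occC m rest j ≤ (p : Int) := by
          rw [hrank' j, if_neg hjk]
          omega
        have hq2' : (p : Int) < (rank.set k (r - 1)).getD j 0 := by
          rw [hrank' j, if_neg hjk]
          omega
        exact hL5 j hj p hq1' hq2'
    · intro p hnothing
      have hnone : ∀ j < sz, ¬((rank.set k (r - 1)).getD j 0 - occC m rest j ≤ (p : Int) ∧ (p : Int) < (rank.set k (r - 1)).getD j 0) := by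
        intro j hj
        rw [hrank' j]
        have e := hocc j
        have hnj := hnothing j hj
        by_cases hjk : j = k
        · rw [if_pos hjk] at e
          rw [if_pos hjk]
          have := hrj j hjk
          omega
        · rw [if_neg hjk] at e
          rw [if_neg hjk]
          omega
      have hpne : p ≠ p0 := by
        intro hpe
        have hnk := hnothing k hk
        have e := hocc k
        rw [if_pos rfl] at e
        have hn := hoccnn rest k
        omega
      rw [hL6 p hnone, getD_set_ne arr p0 p _ "" hpne]

-- every position below the total sum lies in the segment of exactly one present bucket
lemma covering (count : List Int)
    (p : Nat) (hp : (p : Int) < preS count count.length) :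
    ∃ j < count.length, count.getD j 0 ≠ 0 ∧ preS count j ≤ (p : Int) ∧ (p : Int) < preS count (j + 1) := by
  by_contra hcon
  -- show by induction that preS count k ≤ p for every k ≤ length, contradicting hp
  have key : ∀ k ≤ count.length, preS count k ≤ (p : Int) := by
    intro k hk
    induction k with
    | zero => simp [preS]
    | succ k ih =>
      have hk' : k < count.length := by omega
      have h1 := ih (by omega)
      have h2 := preS_succ count k hk'
      by_cases hz : count.getD k 0 = 0
      · omega
      · have h3 : ¬ ((p : Int) < preS count (k + 1)) := by
          intro hq
          exact hcon ⟨k, hk', hz, h1, hq⟩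
        omega
  have := key count.length (le_refl _)
  omega

-- lists of equal length with equal getD at every index are equal
lemma eq_of_getD {α : Type} (d : α) (xs ys : List α) (hlen : xs.length = ys.length)
    (h : ∀ p < xs.length, xs.getD p d = ys.getD p d) : xs = ys := by
  apply List.ext_getElem hlen
  intro i h1 h2
  have := h i h1
  simpa [List.getD_eq_getElem?_getD, h1, h2] using this

lemma occC_nonneg (m : Nat) (L : List Char) (j : Nat) : 0 ≤ occC m L j :=
  Int.natCast_nonneg _

-- ===== VERDICT (by name: the statement is the Claim_ definition above) =====
theorem countingSort_spec : Claim_equal_countingSort := by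
  intro input minChar maxChar hdom hpre
  obtain ⟨hm1, hM1, h3⟩ := hpre
  obtain ⟨mc, hmc⟩ : ∃ c, minChar.toList = [c] := by
    cases hx : minChar.toList with
    | nil => rw [hx] at hm1; simp at hm1
    | cons a t =>
      cases t with
      | nil => exact ⟨a, rfl⟩
      | cons b t2 => rw [hx] at hm1; simp at hm1
  obtain ⟨Mc, hMc⟩ : ∃ c, maxChar.toList = [c] := by
    cases hx : maxChar.toList with
    | nil => rw [hx] at hM1; simp at hM1
    | cons a t =>
      cases t with
      | nil => exact ⟨a, rfl⟩
      | cons b t2 => rw [hx] at hM1; simp at hM1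
  set m := mc.toNat with hmdef
  set M := Mc.toNat with hMdef
  set L := input.toList with hLdef
  have h3' : ∀ c ∈ L, m ≤ c.toNat ∧ c.toNat ≤ M := by
    intro c hc
    rw [hmc, hMc] at h3
    have h := List.all_eq_true.mp h3 c hc
    simp only [List.headD_cons, Bool.and_eq_true, decide_eq_true_eq] at h
    exact ⟨Fin.mk_le_mk.mp h.1, Fin.mk_le_mk.mp h.2⟩
  show countingSort input minChar maxChar = countingSort_alt input minChar maxChar
  unfold countingSort countingSort_alt pyOrd?
  rw [hmc, hMc]
  dsimp only
  by_cases hMm : M < m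
  · -- empty alphabet: the input must be empty and everything collapses
    have hL : L = [] := by
      cases hxL : L with
      | nil => rfl
      | cons a t =>
        exfalso
        have := h3' a (by rw [hxL]; exact List.mem_cons_self ..)
        omega
    simp only [← hLdef, hL, csCountLoop, csScatterLoop, csRankPass, csBuildPass,
      PySem.List.pyRange_one_eq_nil (show ((Mc.toNat : Int) - (mc.toNat : Int) + 1) ≤ 0 by omega)]
    simp
  · -- the real case
    have hsz : ((M : Int) - (m : Int) + 1).toNat = M - m + 1 := by omega
    set sz := M - m + 1 with hszdef
    have hin : ∀ c ∈ L, m ≤ c.toNat ∧ c.toNat < m + sz := by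
      intro c hc
      have := h3' c hc
      omega
    obtain ⟨count, hcnt, hclen0, hcget0, hcsum0⟩ :=
      csCountLoop_spec m L (List.replicate sz 0)
        (by simpa using hin)
    have hclen : count.length = sz := by simpa using hclen0
    have hcget : ∀ j < sz, count.getD j 0 = occC m L j := by
      intro j hj
      have := hcget0 j (by simpa using hj)
      rwa [List.getD_replicate 0 hj, zero_add] at this
    have hcsum : count.sum = (L.length : Int) := by
      rw [hcsum0]
      simp
    have hpos : ∀ j < count.length, 0 ≤ count.getD j 0 := by
      intro j hj
      rw [hcget j (by omega)]
      exact occC_nonneg m L j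
    have hpreSfull : preS count count.length = (L.length : Int) := by
      rw [preS, List.take_length, hcsum]
    -- rewrite the shared alphabet-size expressions
    have hbig : ((M : Int) - (m : Int) + 1) = (sz : Int) := by omega
    rw [hbig]
    simp only [Int.toNat_natCast]
    rw [hcnt]
    dsimp only
    rw [← hclen]
    -- A's rank pass
    obtain ⟨hRlen, hRget⟩ := rankA_spec count
    set FA := csRankPass count (count.length : Int) with hFA
    -- the scatter pass via the interval lemma
    have hinCL : ∀ c ∈ L, m ≤ c.toNat ∧ c.toNat < m + sz := hin
    have hoccD : ∀ j < sz, occC m L j = count.getD j 0 := by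
      intro j hj
      rw [hcget j hj]
    obtain ⟨rankF, arrF, hS1, hS2, hS3, hS4, hS5, hS6⟩ :=
      csScatterLoop_spec m sz L FA.2 (List.replicate L.length "")
        (by rw [hRlen, hclen])
        hinCL
        (by
          intro j hj hocc
          rw [hRget j (by omega), hoccD j hj]
          have hne : count.getD j 0 ≠ 0 := by
            rw [hoccD j hj] at hocc
            omega
          rw [if_pos hne]
          have hps := preS_succ count j (by omega)
          have hp0 := preS_nonneg count hpos j (by omega)
          have hmon := preS_mono count hpos (j + 1) count.length (by omega) (le_refl _)
          rw [List.length_replicate]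
          constructor <;> omega
          )
        (by
          intro j hj j' hj' hne hoj hoj'
          rw [hRget j (by omega), hRget j' (by omega), hoccD j hj, hoccD j' hj']
          have hnej : count.getD j 0 ≠ 0 := by rw [hoccD j hj] at hoj; omega
          have hnej' : count.getD j' 0 ≠ 0 := by rw [hoccD j' hj'] at hoj'; omega
          rw [if_pos hnej, if_pos hnej']
          have hpsj := preS_succ count j (by omega)
          have hpsj' := preS_succ count j' (by omega)
          rcases Nat.lt_or_ge j j' with hlt | hge
          · left
            have := preS_mono count hpos (j + 1) j' (by omega) (by omega)
            omega
          · right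
            have := preS_mono count hpos (j' + 1) j (by omega) (by omega)
            omega)
    rw [hS1]
    -- B's fused pass
    rw [foldB_spec m count]
    -- compare the three components
    refine Prod.ext ?_ (Prod.ext ?_ rfl)
    · -- sorted output
      show arrF = segcat m count count.length
      have hlenA : arrF.length = L.length := by
        rw [hS3, List.length_replicate]
      have hlenB : ((segcat m count count.length).length : Int) = (L.length : Int) := by
        rw [segcat_length m count count.length (le_refl _) hpos, hpreSfull]
      apply eq_of_getD ""
      · omega
      · intro p hp
        have hpn : p < L.length := by omega
        have hpI : (p : Int) < preS count count.length := by
          rw [hpreSfull]; omega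
        obtain ⟨j, hj, hjne, hj1, hj2⟩ := covering count p hpI
        have hps := preS_succ count j hj
        have hrj : FA.2.getD j 0 = preS count (j + 1) := by
          rw [hRget j hj, if_pos hjne]
        have hoj : occC m L j = count.getD j 0 := hoccD j (by omega)
        have hA := hS5 j (by omega) p
          (by rw [hrj, hoj]; omega) (by rw [hrj]; omega)
        rw [hA, segcat_getD m count hpos j hj p hj1 hj2]
    · -- rank
      show rankF = _
      apply eq_of_getD 0
      · rw [hS2, rankB_length, hclen]
      · intro p hp
        have hp' : p < count.length := by
          rw [hS2] at hp
          omega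
        rw [hS4 p (by omega), rankB_getD count count.length (le_refl _) p hp',
          hRget p hp', hoccD p (by omega)]
        have hps := preS_succ count p hp'
        by_cases hz : count.getD p 0 ≠ 0
        · rw [if_pos hz, if_pos ⟨by omega, hz⟩]
          omega
        · rw [if_neg hz, if_neg (by
            intro hcon
            exact hz hcon.2)]
          simp only [not_not] at hz
          omega
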